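-- pv_equiv track=rewrite | github.com/msr-fiddle/phaze | third_party_for_phaze/sunstone/src/tile_graph.py | enumerate_children_prior
-- ===== SOURCE A (Python) =====
-- def enumerate_children_prior(node, factors, prior):
--     """
--     Enumerates the childen of a given node, based on a dictionary of
--     factors
--
--     Parameters
--     ----------
--     node:
--         tuple containing the different tiling dimensions
--     factors:
--         dictionary containing (bound - list) pairs, where the list contains
--         factors of the given bound in the order of traversal (e.g ascending
--         order for bottom-up)
--     """
--     children = {}
--
--     full = True
--     skip = 0
--     for b in prior:
--         index = factors[b].index(node[b])
--
--         if index != (len(factors[b]) - 1):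
--             full = False
--             break
--
--     # the dimension order in the tuple is PQRSCMN
--     # the number of children is <= 7 (less if certain bounds are already at
--     # the last factor)
--     for b in factors.keys():
--         index = factors[b].index(node[b])
--
--         if index != (len(factors[b]) - 1):
--
--             # shallow copy is good enough here
--             # vals are all primitive
--             new_node = node.copy()
--             new_node[b] = factors[b][index + 1]
--
--             prioritized_fact = 1
--             rest_fact = 1
--
--             for bb in factors.keys():
--                 if bb in prior:
--                     prioritized_fact *= new_node[bb]
--                 else:
--                     rest_fact *= new_node[bb]
--
--             if full or (prioritized_fact > rest_fact):
--                 children[b] = new_node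
--             else:
--                 skip += 1
--     return children, skip
-- ===== SOURCE B (Python) =====
-- def _partial_products(group, node):
--     # others[k] = product of node values over group without k; total = product over group
--     others = {}
--     run = 1
--     for k in group:
--         others[k] = run
--         run *= node[k]
--     total = run
--     run = 1
--     for k in reversed(group):
--         others[k] = others[k] * run
--         run *= node[k]
--     return others, total
--
--
-- def enumerate_children_prior(node, factors, prior):
--     keys = list(factors.keys())
--     prior_set = set(prior)
--     full = all(factors[b].index(node[b]) == len(factors[b]) - 1 for b in prior)
--     pk = [b for b in keys if b in prior_set]
--     rk = [b for b in keys if b not in prior_set]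
--     prio_others, prio_total = _partial_products(pk, node)
--     rest_others, rest_total = _partial_products(rk, node)
--     children = {}
--     skip = 0
--     for b in keys:
--         facs = factors[b]
--         i = facs.index(node[b])
--         if i != len(facs) - 1:
--             nv = facs[i + 1]
--             if b in prior_set:
--                 prio, rest = prio_others[b] * nv, rest_total
--             else:
--                 prio, rest = prio_total, rest_others[b] * nv
--             if full or prio > rest:
--                 new_node = dict(node)
--                 new_node[b] = nv
--                 children[b] = new_node
--             else:
--                 skip += 1
--     return children, skip
-- ===== Notes on version B (the rewrite author's own statement) =====
-- stated objective: faster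
-- what changed: A recomputes both priority/rest products with an inner loop over all factor keys for every candidate child; B precomputes prefix/suffix partial products (product of all other keys in each group) once and derives each child's two products by a single substitution, and computes 'full' with a short-circuiting all().
import Mathlib
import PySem

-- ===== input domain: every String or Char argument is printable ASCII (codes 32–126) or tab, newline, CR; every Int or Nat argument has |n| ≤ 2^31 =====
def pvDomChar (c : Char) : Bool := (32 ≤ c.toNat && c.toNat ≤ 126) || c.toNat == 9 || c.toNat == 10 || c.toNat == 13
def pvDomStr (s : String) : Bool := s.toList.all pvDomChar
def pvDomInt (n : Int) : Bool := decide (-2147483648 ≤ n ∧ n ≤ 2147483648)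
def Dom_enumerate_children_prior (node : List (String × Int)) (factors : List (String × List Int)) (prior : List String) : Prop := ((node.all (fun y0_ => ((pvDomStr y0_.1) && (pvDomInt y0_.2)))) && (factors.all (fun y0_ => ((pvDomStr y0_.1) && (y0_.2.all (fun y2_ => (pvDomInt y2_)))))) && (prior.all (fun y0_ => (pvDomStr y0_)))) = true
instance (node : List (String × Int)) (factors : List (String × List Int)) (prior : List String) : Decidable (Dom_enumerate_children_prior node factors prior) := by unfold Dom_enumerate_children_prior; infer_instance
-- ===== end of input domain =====

-- B replaces A's quadratic inner product loop by prefix/suffix partial products computed once before the loop.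

-- ===== PORT A =====
-- first loop of A: 'for b in prior: … ; if index != len-1: full = False; break'
def pvPriorFullA (F : PySem.Dict String (List Int)) (N : PySem.Dict String Int) : List String → Bool
  | [] => true
  | b :: rest =>
      let facs := F.getD b []
      let idx : Nat := (PySem.List.index? facs (N.getD b 0)).getD 0
      if (idx : Int) = (facs.length : Int) - 1 then pvPriorFullA F N rest else false

-- body of A's 'for b in factors.keys()' loop (incl. the inner 'for bb in factors.keys()' product loop)
def pvStepA (N : PySem.Dict String Int) (F : PySem.Dict String (List Int)) (prior : List String)
    (full : Bool) (st : PySem.Dict String (PySem.Dict String Int) × Int) (b : String) :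
    PySem.Dict String (PySem.Dict String Int) × Int :=
  let facs := F.getD b []
  let idx : Nat := (PySem.List.index? facs (N.getD b 0)).getD 0
  if (idx : Int) ≠ (facs.length : Int) - 1 then
    let new_node := N.insert b (PySem.List.pyGetD facs ((idx : Int) + 1) 0)
    let pr := F.keys.foldl (fun (s : Int × Int) bb =>
        if prior.contains bb then (s.1 * new_node.getD bb 0, s.2)
        else (s.1, s.2 * new_node.getD bb 0)) (1, 1)
    if full = true ∨ pr.1 > pr.2 then (st.1.insert b new_node, st.2) else (st.1, st.2 + 1)
  else st

def enumerate_children_prior (node : List (String × Int)) (factors : List (String × List Int)) (prior : List String) : (List (String × List (String × Int))) × Int :=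
  let N := PySem.Dict.ofList node
  let F := PySem.Dict.ofList factors
  let full := pvPriorFullA F N prior
  let res := F.keys.foldl (pvStepA N F prior full) (PySem.Dict.empty, 0)
  (res.1.items.map (fun p => (p.1, p.2.items)), res.2)

-- ===== PORT B =====
-- Source B's _partial_products: forward pass (prefix products), backward pass (multiply in the suffix products)
def pvPartialProds (group : List String) (N : PySem.Dict String Int) : PySem.Dict String Int × Int :=
  let fwd := group.foldl (fun (st : PySem.Dict String Int × Int) k =>
      (st.1.insert k st.2, st.2 * N.getD k 0)) (PySem.Dict.empty, 1)
  let bwd := group.reverse.foldl (fun (st : PySem.Dict String Int × Int) k =>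
      (st.1.insert k (st.1.getD k 0 * st.2), st.2 * N.getD k 0)) (fwd.1, 1)
  (bwd.1, fwd.2)

-- body of Source B's 'for b in keys' loop: the two products come from the precomputed aggregates
def pvStepB (N : PySem.Dict String Int) (F : PySem.Dict String (List Int)) (priorSet : PySem.Set String)
    (full : Bool) (pp rp : PySem.Dict String Int × Int)
    (st : PySem.Dict String (PySem.Dict String Int) × Int) (b : String) :
    PySem.Dict String (PySem.Dict String Int) × Int :=
  let facs := F.getD b []
  let i : Nat := (PySem.List.index? facs (N.getD b 0)).getD 0
  if (i : Int) ≠ (facs.length : Int) - 1 then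
    let nv := PySem.List.pyGetD facs ((i : Int) + 1) 0
    let pr := if PySem.Set.contains priorSet b
      then (pp.1.getD b 0 * nv, rp.2)
      else (pp.2, rp.1.getD b 0 * nv)
    if full = true ∨ pr.1 > pr.2 then (st.1.insert b (N.insert b nv), st.2) else (st.1, st.2 + 1)
  else st

def enumerate_children_prior_alt (node : List (String × Int)) (factors : List (String × List Int)) (prior : List String) : (List (String × List (String × Int))) × Int :=
  let N := PySem.Dict.ofList node
  let F := PySem.Dict.ofList factors
  let keys := F.keys
  let priorSet : PySem.Set String := PySem.Set.ofList prior
  let full := prior.all (fun b =>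
      decide ((((PySem.List.index? (F.getD b []) (N.getD b 0)).getD 0 : Nat) : Int) = ((F.getD b []).length : Int) - 1))
  let pk := keys.filter (fun x => PySem.Set.contains priorSet x)
  let rk := keys.filter (fun x => ! PySem.Set.contains priorSet x)
  let pp := pvPartialProds pk N
  let rp := pvPartialProds rk N
  let res := keys.foldl (pvStepB N F priorSet full pp rp) (PySem.Dict.empty, 0)
  (res.1.items.map (fun p => (p.1, p.2.items)), res.2)

-- ===== PRECONDITION & SPEC =====
def pvKeyOk (node : List (String × Int)) (factors : List (String × List Int)) (b : String) : Bool :=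
  (PySem.Dict.ofList factors).contains b && (PySem.Dict.ofList node).contains b &&
  decide ((PySem.Dict.ofList node).getD b 0 ∈ (PySem.Dict.ofList factors).getD b [])

def pvAtLast (node : List (String × Int)) (factors : List (String × List Int)) (b : String) : Bool :=
  PySem.List.index? ((PySem.Dict.ofList factors).getD b []) ((PySem.Dict.ofList node).getD b 0)
    == some (((PySem.Dict.ofList factors).getD b []).length - 1)

-- Pre_: exactly the inputs on which the Python A returns normally (no KeyError/ValueError): every factors
-- key is a node key whose value occurs in its factor list, and the prior scan reaches no bad key (a prior
-- key is reached only while all earlier prior keys sit at their last factor, because the loop breaks).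
def Pre_enumerate_children_prior (node : List (String × Int)) (factors : List (String × List Int)) (prior : List String) : Prop :=
  (∀ b ∈ (PySem.Dict.ofList factors).keys, pvKeyOk node factors b = true) ∧
  (∀ i, i < prior.length → (∀ j, j < i → pvAtLast node factors (prior.getD j "") = true) →
      pvKeyOk node factors (prior.getD i "") = true)

instance (node : List (String × Int)) (factors : List (String × List Int)) (prior : List String) : Decidable (Pre_enumerate_children_prior node factors prior) := by unfold Pre_enumerate_children_prior; infer_instance

def pvWitness_enumerate_children_prior : (List (String × Int)) × (List (String × List Int)) × List String :=
  ([("p", 2), ("q", 3)], [("p", [1, 2, 4]), ("q", [3, 6])], ["q"])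

def Spec_enumerate_children_prior (node : List (String × Int)) (factors : List (String × List Int)) (prior : List String) (out : (List (String × List (String × Int))) × Int) : Prop := out = enumerate_children_prior_alt node factors prior
instance (node : List (String × Int)) (factors : List (String × List Int)) (prior : List String) (out : (List (String × List (String × Int))) × Int) : Decidable (Spec_enumerate_children_prior node factors prior out) := by unfold Spec_enumerate_children_prior; infer_instance

-- ===== CLAIM (what is proved, stated in full; the proofs are below) =====
def Claim_equal_enumerate_children_prior : Prop := ∀ (node : List (String × Int)) (factors : List (String × List Int)) (prior : List String), Dom_enumerate_children_prior node factors prior → Pre_enumerate_children_prior node factors prior → Spec_enumerate_children_prior node factors prior (enumerate_children_prior node factors prior)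

-- ===== LEMMAS AND PROOFS =====

-- A's break-on-first-failure scan computes the same boolean as B's short-circuiting all(…)
theorem pvFull_eq (F : PySem.Dict String (List Int)) (N : PySem.Dict String Int) :
    ∀ prior : List String, pvPriorFullA F N prior = prior.all (fun b =>
      decide ((((PySem.List.index? (F.getD b []) (N.getD b 0)).getD 0 : Nat) : Int) = ((F.getD b []).length : Int) - 1))
  | [] => rfl
  | b :: rest => by
      rw [List.all_cons]
      by_cases hc : ((((PySem.List.index? (F.getD b []) (N.getD b 0)).getD 0 : Nat) : Int)
          = ((F.getD b []).length : Int) - 1)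
      · simp only [pvPriorFullA, if_pos hc, decide_eq_true hc, Bool.true_and]
        exact pvFull_eq F N rest
      · simp only [pvPriorFullA, if_neg hc, decide_eq_false hc, Bool.false_and]

-- forward pass: running product in the second component
theorem pvFwd_snd (N : PySem.Dict String Int) :
    ∀ (g : List String) (d : PySem.Dict String Int) (r : Int),
    (g.foldl (fun (st : PySem.Dict String Int × Int) k =>
        (st.1.insert k st.2, st.2 * N.getD k 0)) (d, r)).2
      = r * (g.map (fun k => N.getD k 0)).prod
  | [], d, r => by simp
  | k :: g, d, r => by
      rw [List.foldl_cons, List.map_cons, List.prod_cons, pvFwd_snd N g]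
      ring

-- forward pass leaves absent keys at their previous value
theorem pvFwd_notmem (N : PySem.Dict String Int) (b : String) :
    ∀ (g : List String), b ∉ g → ∀ (d : PySem.Dict String Int) (r : Int),
    ((g.foldl (fun (st : PySem.Dict String Int × Int) k =>
        (st.1.insert k st.2, st.2 * N.getD k 0)) (d, r)).1).getD b 0 = d.getD b 0
  | [], _, d, r => by simp
  | k :: g, hb, d, r => by
      have hk : ¬ (b = k) := fun h => hb (h ▸ List.mem_cons_self ..)
      have hg : b ∉ g := fun h => hb (List.mem_cons_of_mem _ h)
      rw [List.foldl_cons, pvFwd_notmem N b g hg, PySem.Dict.getD_insert, if_neg hk]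

-- forward pass stores the prefix product at b
theorem pvFwd_at (N : PySem.Dict String Int) (b : String) :
    ∀ (l₁ l₂ : List String), b ∉ l₂ → ∀ (d : PySem.Dict String Int) (r : Int),
    (((l₁ ++ b :: l₂).foldl (fun (st : PySem.Dict String Int × Int) k =>
        (st.1.insert k st.2, st.2 * N.getD k 0)) (d, r)).1).getD b 0
      = r * (l₁.map (fun k => N.getD k 0)).prod
  | [], l₂, h2, d, r => by
      rw [List.nil_append, List.foldl_cons, pvFwd_notmem N b l₂ h2, PySem.Dict.getD_insert]
      simp
  | a :: l₁, l₂, h2, d, r => by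
      rw [List.cons_append, List.foldl_cons, pvFwd_at N b l₁ l₂ h2, List.map_cons, List.prod_cons]
      ring

-- backward pass leaves absent keys at their previous value
theorem pvBwd_notmem (N : PySem.Dict String Int) (b : String) :
    ∀ (g : List String), b ∉ g → ∀ (d : PySem.Dict String Int) (r : Int),
    ((g.foldl (fun (st : PySem.Dict String Int × Int) k =>
        (st.1.insert k (st.1.getD k 0 * st.2), st.2 * N.getD k 0)) (d, r)).1).getD b 0 = d.getD b 0
  | [], _, d, r => by simp
  | k :: g, hb, d, r => by
      have hk : ¬ (b = k) := fun h => hb (h ▸ List.mem_cons_self ..)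
      have hg : b ∉ g := fun h => hb (List.mem_cons_of_mem _ h)
      rw [List.foldl_cons, pvBwd_notmem N b g hg, PySem.Dict.getD_insert, if_neg hk]

-- backward pass multiplies b's entry by the product of the keys processed before it
theorem pvBwd_at (N : PySem.Dict String Int) (b : String) :
    ∀ (s t : List String), b ∉ s → b ∉ t → ∀ (d : PySem.Dict String Int) (r : Int),
    (((s ++ b :: t).foldl (fun (st : PySem.Dict String Int × Int) k =>
        (st.1.insert k (st.1.getD k 0 * st.2), st.2 * N.getD k 0)) (d, r)).1).getD b 0
      = d.getD b 0 * (r * (s.map (fun k => N.getD k 0)).prod)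
  | [], t, _, ht, d, r => by
      rw [List.nil_append, List.foldl_cons, pvBwd_notmem N b t ht, PySem.Dict.getD_insert]
      simp
  | a :: s, t, hs, ht, d, r => by
      have ha : ¬ (b = a) := fun h => hs (h ▸ List.mem_cons_self ..)
      have hs' : b ∉ s := fun h => hs (List.mem_cons_of_mem _ h)
      rw [List.cons_append, List.foldl_cons, pvBwd_at N b s t hs' ht, PySem.Dict.getD_insert,
        if_neg ha, List.map_cons, List.prod_cons]
      ring

theorem pvPartialProds_snd (N : PySem.Dict String Int) (g : List String) :
    (pvPartialProds g N).2 = (g.map (fun k => N.getD k 0)).prod := by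
  simp only [pvPartialProds, pvFwd_snd N g, one_mul]

-- the partial-products dict holds, at b, the product of all OTHER group members
theorem pvPartialProds_at (N : PySem.Dict String Int) (b : String) (l₁ l₂ : List String)
    (h1 : b ∉ l₁) (h2 : b ∉ l₂) :
    ((pvPartialProds (l₁ ++ b :: l₂) N).1).getD b 0
      = (l₁.map (fun k => N.getD k 0)).prod * (l₂.map (fun k => N.getD k 0)).prod := by
  have hrev : (l₁ ++ b :: l₂).reverse = l₂.reverse ++ b :: l₁.reverse := by
    simp [List.reverse_append]
  have h2r : b ∉ l₂.reverse := by simpa using h2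
  have h1r : b ∉ l₁.reverse := by simpa using h1
  simp only [pvPartialProds, hrev]
  rw [pvBwd_at N b l₂.reverse l₁.reverse h2r h1r, pvFwd_at N b l₁ l₂ h2]
  have hprev : (l₂.reverse.map (fun k => N.getD k 0)).prod = (l₂.map (fun k => N.getD k 0)).prod := by
    rw [List.map_reverse, List.prod_reverse]
  rw [hprev]; ring

-- membership in set(prior) is membership in prior
theorem pvSetContains_eq (prior : List String) (x : String) :
    PySem.Set.contains (PySem.Set.ofList prior) x = prior.contains x := by
  by_cases hx : x ∈ prior
  · simp [PySem.Set.contains, PySem.Set.mem_ofList, hx]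
  · simp [PySem.Set.contains, PySem.Set.mem_ofList, hx]

-- A's single pair-accumulator loop is the two filtered products
theorem pvPairFold (N : PySem.Dict String Int) (prior : List String) (b : String) (nv : Int) :
    ∀ (l : List String) (a c : Int),
    l.foldl (fun (s : Int × Int) bb =>
        if prior.contains bb then (s.1 * (N.insert b nv).getD bb 0, s.2)
        else (s.1, s.2 * (N.insert b nv).getD bb 0)) (a, c)
      = (a * ((l.filter (fun x => prior.contains x)).map (fun bb => (N.insert b nv).getD bb 0)).prod,
         c * ((l.filter (fun x => ! prior.contains x)).map (fun bb => (N.insert b nv).getD bb 0)).prod)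
  | [], a, c => by simp
  | x :: l, a, c => by
      rw [List.foldl_cons]
      by_cases hp : prior.contains x = true
      · rw [if_pos hp, pvPairFold N prior b nv l]
        simp only [List.filter_cons, hp, Bool.not_true, if_true, List.map_cons,
          List.prod_cons, Prod.mk.injEq]
        exact ⟨by ring, rfl⟩
      · rw [if_neg hp, pvPairFold N prior b nv l]
        have hfp : prior.contains x = false := by revert hp; cases prior.contains x <;> simp
        simp only [List.filter_cons, hfp, Bool.not_false, if_true, List.map_cons,
          List.prod_cons, Prod.mk.injEq]
        exact ⟨rfl, by ring⟩

-- A's inner product loop equals B's substitution into the precomputed partial products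
theorem pvProducts_eq (N : PySem.Dict String Int) (prior keys : List String)
    (hnd : keys.Nodup) (b : String) (hb : b ∈ keys) (nv : Int) :
    keys.foldl (fun (s : Int × Int) bb =>
        if prior.contains bb then (s.1 * (N.insert b nv).getD bb 0, s.2)
        else (s.1, s.2 * (N.insert b nv).getD bb 0)) (1, 1)
    = (if PySem.Set.contains (PySem.Set.ofList prior) b
        then (((pvPartialProds (keys.filter (fun x => PySem.Set.contains (PySem.Set.ofList prior) x)) N).1).getD b 0 * nv,
              (pvPartialProds (keys.filter (fun x => ! PySem.Set.contains (PySem.Set.ofList prior) x)) N).2)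
        else ((pvPartialProds (keys.filter (fun x => PySem.Set.contains (PySem.Set.ofList prior) x)) N).2,
              ((pvPartialProds (keys.filter (fun x => ! PySem.Set.contains (PySem.Set.ofList prior) x)) N).1).getD b 0 * nv)) := by
  have hsc : ∀ x, PySem.Set.contains (PySem.Set.ofList prior) x = prior.contains x := pvSetContains_eq prior
  simp only [hsc]
  rw [pvPairFold N prior b nv keys 1 1]
  by_cases hbp : prior.contains b = true
  · rw [if_pos hbp]
    have hbpk : b ∈ keys.filter (fun x => prior.contains x) := List.mem_filter.mpr ⟨hb, hbp⟩
    have hbrk : b ∉ keys.filter (fun x => ! prior.contains x) := by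
      intro hmem
      have h2 := (List.mem_filter.mp hmem).2
      rw [hbp] at h2; simp at h2
    obtain ⟨l₁, l₂, hpk⟩ := List.append_of_mem hbpk
    have hndpk : (keys.filter (fun x => prior.contains x)).Nodup := hnd.filter _
    rw [hpk] at hndpk
    have hb2 : b ∉ l₂ := (List.nodup_cons.mp (List.Nodup.of_append_right hndpk)).1
    have hb1 : b ∉ l₁ := fun hmem => (List.disjoint_of_nodup_append hndpk) hmem (List.mem_cons_self ..)
    have hmap1 : l₁.map (fun bb => (N.insert b nv).getD bb 0) = l₁.map (fun k => N.getD k 0) :=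
      List.map_congr_left fun x hx => by
        have hxb : ¬ (x = b) := fun he => hb1 (he ▸ hx)
        rw [PySem.Dict.getD_insert, if_neg hxb]
    have hmap2 : l₂.map (fun bb => (N.insert b nv).getD bb 0) = l₂.map (fun k => N.getD k 0) :=
      List.map_congr_left fun x hx => by
        have hxb : ¬ (x = b) := fun he => hb2 (he ▸ hx)
        rw [PySem.Dict.getD_insert, if_neg hxb]
    have hmaprk : (keys.filter (fun x => ! prior.contains x)).map (fun bb => (N.insert b nv).getD bb 0)
        = (keys.filter (fun x => ! prior.contains x)).map (fun k => N.getD k 0) :=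
      List.map_congr_left fun x hx => by
        have hxb : ¬ (x = b) := fun he => hbrk (he ▸ hx)
        rw [PySem.Dict.getD_insert, if_neg hxb]
    rw [hpk, hmaprk, pvPartialProds_snd, pvPartialProds_at N b l₁ l₂ hb1 hb2]
    simp only [List.map_append, List.map_cons, List.prod_append, List.prod_cons, hmap1, hmap2,
      Prod.mk.injEq]
    constructor
    · rw [PySem.Dict.getD_insert, if_pos rfl]; ring
    · ring
  · rw [if_neg hbp]
    have hfb : prior.contains b = false := by revert hbp; cases prior.contains b <;> simp
    have hbrk : b ∈ keys.filter (fun x => ! prior.contains x) :=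
      List.mem_filter.mpr ⟨hb, by rw [hfb]; rfl⟩
    have hbpk : b ∉ keys.filter (fun x => prior.contains x) := by
      intro hmem
      have h2 := (List.mem_filter.mp hmem).2
      rw [hfb] at h2; simp at h2
    obtain ⟨l₁, l₂, hrk⟩ := List.append_of_mem hbrk
    have hndrk : (keys.filter (fun x => ! prior.contains x)).Nodup := hnd.filter _
    rw [hrk] at hndrk
    have hb2 : b ∉ l₂ := (List.nodup_cons.mp (List.Nodup.of_append_right hndrk)).1
    have hb1 : b ∉ l₁ := fun hmem => (List.disjoint_of_nodup_append hndrk) hmem (List.mem_cons_self ..)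
    have hmap1 : l₁.map (fun bb => (N.insert b nv).getD bb 0) = l₁.map (fun k => N.getD k 0) :=
      List.map_congr_left fun x hx => by
        have hxb : ¬ (x = b) := fun he => hb1 (he ▸ hx)
        rw [PySem.Dict.getD_insert, if_neg hxb]
    have hmap2 : l₂.map (fun bb => (N.insert b nv).getD bb 0) = l₂.map (fun k => N.getD k 0) :=
      List.map_congr_left fun x hx => by
        have hxb : ¬ (x = b) := fun he => hb2 (he ▸ hx)
        rw [PySem.Dict.getD_insert, if_neg hxb]
    have hmappk : (keys.filter (fun x => prior.contains x)).map (fun bb => (N.insert b nv).getD bb 0)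
        = (keys.filter (fun x => prior.contains x)).map (fun k => N.getD k 0) :=
      List.map_congr_left fun x hx => by
        have hxb : ¬ (x = b) := fun he => hbpk (he ▸ hx)
        rw [PySem.Dict.getD_insert, if_neg hxb]
    rw [hrk, hmappk, pvPartialProds_snd, pvPartialProds_at N b l₁ l₂ hb1 hb2]
    simp only [List.map_append, List.map_cons, List.prod_append, List.prod_cons, hmap1, hmap2,
      Prod.mk.injEq]
    constructor
    · ring
    · rw [PySem.Dict.getD_insert, if_pos rfl]; ring

-- one loop step of A equals one loop step of B (for a genuine key of factors)
theorem pvStep_eq (N : PySem.Dict String Int) (F : PySem.Dict String (List Int))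
    (prior : List String) (full : Bool) (hnd : F.keys.Nodup) (b : String) (hb : b ∈ F.keys)
    (st : PySem.Dict String (PySem.Dict String Int) × Int) :
    pvStepA N F prior full st b
      = pvStepB N F (PySem.Set.ofList prior) full
          (pvPartialProds (F.keys.filter (fun x => PySem.Set.contains (PySem.Set.ofList prior) x)) N)
          (pvPartialProds (F.keys.filter (fun x => ! PySem.Set.contains (PySem.Set.ofList prior) x)) N)
          st b := by
  simp only [pvStepA, pvStepB]
  by_cases hc : ((((PySem.List.index? (F.getD b []) (N.getD b 0)).getD 0 : Nat) : Int)
      ≠ ((F.getD b []).length : Int) - 1)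
  · rw [if_pos hc, if_pos hc,
      pvProducts_eq N prior F.keys hnd b hb (PySem.List.pyGetD (F.getD b []) (((PySem.List.index? (F.getD b []) (N.getD b 0)).getD 0 : Nat) + 1) 0)]
  · rw [if_neg hc, if_neg hc]

-- ===== VERDICT (by name: the statement is the Claim_ definition above) =====
theorem enumerate_children_prior_spec : Claim_equal_enumerate_children_prior := by
  intro node factors prior _ _
  show enumerate_children_prior node factors prior = enumerate_children_prior_alt node factors prior
  simp only [enumerate_children_prior, enumerate_children_prior_alt]
  rw [pvFull_eq]
  have hfold := PySem.List.foldl_congr_mem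
    (l := (PySem.Dict.ofList factors).keys)
    (init := ((PySem.Dict.empty : PySem.Dict String (PySem.Dict String Int)), (0 : Int)))
    (f := pvStepA (PySem.Dict.ofList node) (PySem.Dict.ofList factors) prior
      (prior.all (fun b => decide ((((PySem.List.index? ((PySem.Dict.ofList factors).getD b []) ((PySem.Dict.ofList node).getD b 0)).getD 0 : Nat) : Int) = (((PySem.Dict.ofList factors).getD b []).length : Int) - 1))))
    (g := pvStepB (PySem.Dict.ofList node) (PySem.Dict.ofList factors) (PySem.Set.ofList prior)
      (prior.all (fun b => decide ((((PySem.List.index? ((PySem.Dict.ofList factors).getD b []) ((PySem.Dict.ofList node).getD b 0)).getD 0 : Nat) : Int) = (((PySem.Dict.ofList factors).getD b []).length : Int) - 1)))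
      (pvPartialProds ((PySem.Dict.ofList factors).keys.filter (fun x => PySem.Set.contains (PySem.Set.ofList prior) x)) (PySem.Dict.ofList node))
      (pvPartialProds ((PySem.Dict.ofList factors).keys.filter (fun x => ! PySem.Set.contains (PySem.Set.ofList prior) x)) (PySem.Dict.ofList node)))
    (fun st b hb => pvStep_eq (PySem.Dict.ofList node) (PySem.Dict.ofList factors) prior _
      (PySem.Dict.nodup_keys_ofList _) b hb st)
  rw [hfold]
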